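-- pv_equiv track=rewrite | github.com/JhuangGan/ssm_ecg | ningbo_data_save_pth.py | get_dx
-- ===== SOURCE A (Python) =====
-- def get_dx(data):
--     dx = None
--     for l in data.split('\n'):
--         if l.startswith('#Dx:'):
--             try:
--                 dx = l.split(': ')[1].strip()
--             except:
--                 pass
--     return dx
-- ===== SOURCE B (Python) =====
-- def get_dx(data):
--     for l in reversed(data.split('\n')):
--         if l.startswith('#Dx:'):
--             parts = l.split(': ')
--             if len(parts) > 1:
--                 return parts[1].strip()
--     return None
-- ===== Notes on version B (the rewrite author's own statement) =====
-- stated objective: alternative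
-- what changed: B scans the lines in reverse and returns early on the first '#Dx:' line whose split(': ') has a second part, instead of A's forward loop that keeps overwriting a variable with try/except swallowing the parse failure.
import Mathlib
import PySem

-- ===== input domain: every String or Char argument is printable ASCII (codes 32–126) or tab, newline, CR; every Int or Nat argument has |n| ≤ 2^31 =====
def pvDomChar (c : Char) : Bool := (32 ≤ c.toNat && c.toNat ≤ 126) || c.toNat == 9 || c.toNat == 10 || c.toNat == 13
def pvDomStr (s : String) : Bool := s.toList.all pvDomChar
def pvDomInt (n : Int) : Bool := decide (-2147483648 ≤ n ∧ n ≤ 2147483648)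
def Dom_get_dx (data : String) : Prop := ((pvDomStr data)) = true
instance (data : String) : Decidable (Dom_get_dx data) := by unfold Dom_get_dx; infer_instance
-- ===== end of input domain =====

-- B replaces A's forward overwrite-with-try/except loop by a reverse scan with early return (alternative decomposition, same cost).

-- ===== PORT A =====
-- s.split(sep) for a NONEMPTY literal sep (split? is none only for sep = ""): exact there
def pySplit (s sep : String) : List String := (PySem.Str.split? s sep).getD [s]

-- forward loop over data.split('\n'); on each '#Dx:' line, dx = l.split(': ')[1].strip(), IndexError swallowed (dx unchanged)
def get_dx (data : String) : Option String :=
  (pySplit data "\n").foldl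
    (fun dx l =>
      if PySem.Str.startswith l "#Dx:" then
        match PySem.List.pyGet? (pySplit l ": ") 1 with
        | some s => some (PySem.Str.strip s)
        | none => dx
      else dx)
    none

-- ===== PORT B =====
-- reverse scan with early return on the first parseable '#Dx:' line
def getDxRev : List String → Option String
  | [] => none
  | l :: rest =>
    if PySem.Str.startswith l "#Dx:" then
      let parts := pySplit l ": "
      if 1 < parts.length then
        (PySem.List.pyGet? parts 1).map PySem.Str.strip
      else getDxRev rest
    else getDxRev rest

def get_dx_alt (data : String) : Option String :=
  getDxRev (pySplit data "\n").reverse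

-- ===== PRECONDITION & SPEC =====
def Spec_get_dx (data : String) (out : Option String) : Prop := out = get_dx_alt data
instance (data : String) (out : Option String) : Decidable (Spec_get_dx data out) := by unfold Spec_get_dx; infer_instance

-- ===== CLAIM (what is proved, stated in full; the proofs are below) =====
def Claim_equal_get_dx : Prop := ∀ (data : String), Dom_get_dx data → Spec_get_dx data (get_dx data)

-- ===== LEMMAS AND PROOFS =====

-- B's scan of a single-element list, as the per-line "step"
lemma getDxRev_cons (l : String) (rest : List String) :
    getDxRev (l :: rest) = if PySem.Str.startswith l "#Dx:" then
        (if 1 < (pySplit l ": ").length then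
          (PySem.List.pyGet? (pySplit l ": ") 1).map PySem.Str.strip
        else getDxRev rest)
      else getDxRev rest := by
  simp [getDxRev]

lemma getDxRev_append (ys : List String) (x : String) :
    getDxRev (ys ++ [x]) = (getDxRev ys).or (getDxRev [x]) := by
  induction ys with
  | nil => simp [getDxRev]
  | cons y ys ih =>
    rw [List.cons_append, getDxRev_cons, getDxRev_cons]
    by_cases h1 : PySem.Str.startswith y "#Dx:"
    · by_cases h2 : 1 < (pySplit y ": ").length
      · have hidx : PySem.List.pyGet? (pySplit y ": ") 1 = (pySplit y ": ")[1]? := by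
          rw [← Nat.cast_one, PySem.List.pyGet?_natCast]
        have hv : (pySplit y ": ")[1]? = some (pySplit y ": ")[1] :=
          List.getElem?_eq_getElem h2
        rw [if_pos h1, if_pos h1, if_pos h2, if_pos h2, hidx, hv]
        simp
      · rw [if_pos h1, if_pos h1, if_neg h2, if_neg h2, ih]
    · rw [if_neg h1, if_neg h1, ih]

-- A's loop body, expressed through B's step
lemma getDxRev_single (x : String) :
    getDxRev [x] = if PySem.Str.startswith x "#Dx:" then
        (if 1 < (pySplit x ": ").length then
          (PySem.List.pyGet? (pySplit x ": ") 1).map PySem.Str.strip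
        else none)
      else none := by
  simp [getDxRev]

lemma step_eq (acc : Option String) (x : String) :
    (if PySem.Str.startswith x "#Dx:" then
        match PySem.List.pyGet? (pySplit x ": ") 1 with
        | some s => some (PySem.Str.strip s)
        | none => acc
      else acc) = (getDxRev [x]).or acc := by
  rw [getDxRev_single]
  by_cases h : PySem.Str.startswith x "#Dx:"
  · have hidx : PySem.List.pyGet? (pySplit x ": ") 1 = (pySplit x ": ")[1]? := by
      rw [← Nat.cast_one, PySem.List.pyGet?_natCast]
    by_cases hlen : 1 < (pySplit x ": ").length
    · have hv : (pySplit x ": ")[1]? = some (pySplit x ": ")[1] :=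
        List.getElem?_eq_getElem hlen
      rw [if_pos h, if_pos h, if_pos hlen, hidx, hv]
      simp
    · have hv : (pySplit x ": ")[1]? = none := List.getElem?_eq_none (by omega)
      rw [if_pos h, if_pos h, if_neg hlen, hidx, hv]
      simp
  · rw [if_neg h, if_neg h]
    simp

lemma foldA_eq (xs : List String) (acc : Option String) :
    xs.foldl
      (fun dx l =>
        if PySem.Str.startswith l "#Dx:" then
          match PySem.List.pyGet? (pySplit l ": ") 1 with
          | some s => some (PySem.Str.strip s)
          | none => dx
        else dx) acc = (getDxRev xs.reverse).or acc := by
  induction xs generalizing acc with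
  | nil => simp [getDxRev]
  | cons x xs ih =>
    simp only [List.foldl_cons, List.reverse_cons]
    rw [ih, getDxRev_append, step_eq, Option.or_assoc]

-- ===== VERDICT (by name: the statement is the Claim_ definition above) =====
theorem get_dx_spec : Claim_equal_get_dx := by
  intro data _
  unfold Spec_get_dx get_dx get_dx_alt
  rw [foldA_eq, Option.or_none]
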